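-- pv_equiv track=rewrite | github.com/Veranith/cs50ai | week2/pageRank/pagerank.py | getLinkParents
-- ===== SOURCE A (Python) =====
-- def getLinkParents(corpus):
--     parents = {}
--
--     for page in corpus.keys():
--         parents[page] = set()
--         for item in corpus.keys():
--             if page in corpus[item]:
--                 parents[page].add(item)
--
--     return parents
-- ===== SOURCE B (Python) =====
-- def getLinkParents(corpus):
--     parents = {page: set() for page in corpus}
--     for src, links in corpus.items():
--         for t in links:
--             if t in parents:
--                 parents[t].add(src)
--     return parents
-- ===== Notes on version B (the rewrite author's own statement) =====
-- stated objective: faster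
-- what changed: Instead of scanning every page's link set for every page (a quadratic double loop with repeated membership tests), B makes a single pass over the corpus inverting the edges: each source adds itself to the parent set of each page it links to.
import Mathlib
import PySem

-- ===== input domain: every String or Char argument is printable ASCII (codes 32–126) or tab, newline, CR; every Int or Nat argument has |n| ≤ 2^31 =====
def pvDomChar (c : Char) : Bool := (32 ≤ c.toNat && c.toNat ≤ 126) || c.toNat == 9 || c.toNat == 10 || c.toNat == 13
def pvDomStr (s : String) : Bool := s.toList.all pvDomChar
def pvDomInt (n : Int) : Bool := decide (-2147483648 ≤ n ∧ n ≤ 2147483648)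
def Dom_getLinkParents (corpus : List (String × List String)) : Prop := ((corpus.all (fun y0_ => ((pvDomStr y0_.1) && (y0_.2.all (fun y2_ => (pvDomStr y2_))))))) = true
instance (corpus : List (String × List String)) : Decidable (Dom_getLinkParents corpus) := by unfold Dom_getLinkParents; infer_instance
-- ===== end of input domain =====

-- B replaces A's all-pairs membership scan by a single pass that inverts the link lists
-- (each source adds itself to its targets' parent sets); objective: faster (asymptotic).

-- shared argument decoding: the dict[str, set[str]] parameter as a Python dict
-- (duplicate keys in the association list overwrite in place, as dict() does)
def pvDictOf (corpus : List (String × List String)) : PySem.Dict String (List String) :=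
  corpus.foldl (fun d p => d.insert p.1 p.2) PySem.Dict.empty

-- ===== PORT A =====
def getLinkParents (corpus : List (String × List String)) : List (String × List String) :=
  ((pvDictOf corpus).keys.foldl
      (fun parents page =>
        (pvDictOf corpus).keys.foldl
          (fun parents item =>
            if ((pvDictOf corpus).getD item []).contains page then
              parents.insert page (PySem.Set.add (parents.getD page []) item)
            else parents)
          (parents.insert page ([] : PySem.Set String)))
      PySem.Dict.empty).items

-- ===== PORT B =====
def getLinkParents_alt (corpus : List (String × List String)) : List (String × List String) :=
  ((pvDictOf corpus).items.foldl
      (fun p sl =>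
        sl.2.foldl
          (fun p t => if p.contains t then p.modify t [] (fun s => PySem.Set.add s sl.1) else p)
          p)
      ((pvDictOf corpus).keys.foldl
        (fun p page => p.insert page ([] : PySem.Set String)) PySem.Dict.empty)).items

-- ===== PRECONDITION & SPEC =====
def Spec_getLinkParents (corpus : List (String × List String)) (out : List (String × List String)) : Prop := out = getLinkParents_alt corpus
instance (corpus : List (String × List String)) (out : List (String × List String)) : Decidable (Spec_getLinkParents corpus out) := by unfold Spec_getLinkParents; infer_instance

-- ===== CLAIM (what is proved, stated in full; the proofs are below) =====
def Claim_equal_getLinkParents : Prop := ∀ (corpus : List (String × List String)), Dom_getLinkParents corpus → Spec_getLinkParents corpus (getLinkParents corpus)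

-- ===== LEMMAS AND PROOFS =====

theorem pv_add_add (s : PySem.Set String) (x : String) :
    PySem.Set.add (PySem.Set.add s x) x = PySem.Set.add s x := by
  by_cases h : x ∈ s <;> simp [PySem.Set.add, h]

-- the per-source inner loop of B collapses to A's single membership test
theorem pv_collapse (p src : String) :
    ∀ (links : List String) (s : PySem.Set String),
      links.foldl (fun s t => if p == t then PySem.Set.add s src else s) s
        = if links.contains p then PySem.Set.add s src else s := by
  intro links
  induction links with
  | nil => intro s; simp
  | cons t ls ih =>
    intro s
    by_cases h : p = t
    · subst h
      rw [List.foldl_cons, if_pos (by simp : ((p == p) = true)), ih, pv_add_add, ite_self,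
        if_pos (by simp : ((p :: ls).contains p = true))]
    · have hb : (p == t) = false := by simp [h]
      rw [List.foldl_cons, if_neg (by simp [h] : ¬((p == t) = true)), ih,
        List.contains_cons, hb, Bool.false_or]

-- A's inner loop only rewrites the entry at `page`
theorem pv_innerA (page : String) (cond : String → Bool) :
    ∀ (l : List String) (P : PySem.Dict String (PySem.Set String)) (s : PySem.Set String),
      l.foldl
        (fun P item =>
          if cond item then P.insert page (PySem.Set.add (P.getD page []) item) else P)
        (P.insert page s)
      = P.insert page (l.foldl (fun s item => if cond item then PySem.Set.add s item else s) s) := by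
  intro l
  induction l with
  | nil => intro P s; simp
  | cons a l ih =>
    intro P s
    simp only [List.foldl_cons]
    by_cases h : cond a = true
    · rw [if_pos h, if_pos h, PySem.Dict.getD_insert_self, PySem.Dict.insert_insert_self, ih]
    · rw [if_neg h, if_neg h, ih]

theorem pv_mkmap_contains (K : List String) (f : String → PySem.Set String) (t : String) :
    (PySem.Dict.mk (K.map (fun p => (p, f p)))).contains t = K.contains t := by
  induction K with
  | nil => rfl
  | cons a K ih =>
    simp_all [PySem.Dict.contains]
    by_cases h : t = a
    · subst h; simp
    · simp [h, Ne.symm h]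

theorem pv_mkmap_getD (K : List String) (f : String → PySem.Set String) (t : String)
    (ht : t ∈ K) :
    (PySem.Dict.mk (K.map (fun p => (p, f p)))).getD t [] = f t := by
  induction K with
  | nil => cases ht
  | cons a K ih =>
    by_cases h : a = t
    · subst h
      simp [PySem.Dict.getD, PySem.Dict.get?, List.find?]
    · have ht' : t ∈ K := by
        rcases List.mem_cons.mp ht with h' | h'
        · exact absurd h'.symm h
        · exact h'
      have hb : (a == t) = false := by simp [h]
      simpa [PySem.Dict.getD, PySem.Dict.get?, List.find?, hb] using ih ht'

-- one guarded modify step on a map-form dict stays in map form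
theorem pv_step_mapform (K : List String) (f : String → PySem.Set String)
    (src t : String) :
    (if (PySem.Dict.mk (K.map (fun p => (p, f p)))).contains t then
        (PySem.Dict.mk (K.map (fun p => (p, f p)))).modify t [] (fun s => PySem.Set.add s src)
      else PySem.Dict.mk (K.map (fun p => (p, f p))))
    = PySem.Dict.mk (K.map (fun p => (p, if p == t then PySem.Set.add (f p) src else f p))) := by
  by_cases ht : t ∈ K
  · have hc : (PySem.Dict.mk (K.map (fun p => (p, f p)))).contains t = true := by
      rw [pv_mkmap_contains]; simpa using ht
    rw [if_pos hc]
    unfold PySem.Dict.modify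
    rw [pv_mkmap_getD K f t ht]
    unfold PySem.Dict.insert
    rw [hc, if_pos rfl]
    congr 1
    simp only [List.map_map]
    apply List.map_congr_left
    intro p hp
    by_cases h : p = t
    · subst h; simp
    · simp [h]
  · have hc : (PySem.Dict.mk (K.map (fun p => (p, f p)))).contains t = false := by
      rw [pv_mkmap_contains]; simpa using ht
    rw [if_neg (by simp [hc])]
    congr 1
    apply List.map_congr_left
    intro p hp
    have h : p ≠ t := fun h => ht (h ▸ hp)
    simp [h]

-- B's inner loop over one source's links, on a map-form dict
theorem pv_B_inner (K : List String) (src : String) :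
    ∀ (links : List String) (f : String → PySem.Set String),
      links.foldl
        (fun p t => if p.contains t then p.modify t [] (fun s => PySem.Set.add s src) else p)
        (PySem.Dict.mk (K.map (fun p => (p, f p))))
      = PySem.Dict.mk (K.map (fun p =>
          (p, links.foldl (fun s t => if p == t then PySem.Set.add s src else s) (f p)))) := by
  intro links
  induction links with
  | nil => intro f; simp
  | cons t ls ih =>
    intro f
    simp only [List.foldl_cons]
    rw [pv_step_mapform K f src t, ih]

-- B's outer loop over the corpus items, on a map-form dict
theorem pv_B_outer (K : List String) :
    ∀ (prs : List (String × List String)) (f : String → PySem.Set String),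
      prs.foldl
        (fun p sl =>
          sl.2.foldl
            (fun p t => if p.contains t then p.modify t [] (fun s => PySem.Set.add s sl.1) else p)
            p)
        (PySem.Dict.mk (K.map (fun p => (p, f p))))
      = PySem.Dict.mk (K.map (fun p =>
          (p, prs.foldl
                (fun s sl =>
                  sl.2.foldl (fun s t => if p == t then PySem.Set.add s sl.1 else s) s)
                (f p)))) := by
  intro prs
  induction prs with
  | nil => intro f; simp
  | cons sl prs ih =>
    intro f
    simp only [List.foldl_cons]
    rw [pv_B_inner K sl.1 sl.2 f, ih]

theorem pv_nodup_keys (corpus : List (String × List String)) : (pvDictOf corpus).keys.Nodup := by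
  unfold pvDictOf
  exact PySem.Dict.nodup_keys_foldl_insert_key corpus Prod.fst (fun _ p => p.2) PySem.Dict.empty
    (by simp [PySem.Dict.empty, PySem.Dict.keys])

theorem pv_getD_of_mem_items (d : PySem.Dict String (List String)) (hnd : d.keys.Nodup)
    (pr : String × List String) (hpr : pr ∈ d.items) : d.getD pr.1 [] = pr.2 := by
  rw [PySem.Dict.items_eq_map_keys d hnd ([] : List String)] at hpr
  rcases List.mem_map.mp hpr with ⟨k, hk, hEq⟩
  rw [← hEq]

-- the common per-page parent list
def pvAval (d : PySem.Dict String (List String)) (page : String) : PySem.Set String :=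
  d.keys.foldl (fun s item => if (d.getD item []).contains page then PySem.Set.add s item else s) []

theorem pv_A_items (corpus : List (String × List String)) :
    getLinkParents corpus
      = (pvDictOf corpus).keys.map (fun p => (p, pvAval (pvDictOf corpus) p)) := by
  unfold getLinkParents
  have hcong :
      (fun (parents : PySem.Dict String (PySem.Set String)) page =>
        (pvDictOf corpus).keys.foldl
          (fun parents item =>
            if ((pvDictOf corpus).getD item []).contains page then
              parents.insert page (PySem.Set.add (parents.getD page []) item)
            else parents)
          (parents.insert page ([] : PySem.Set String)))
      = fun parents page => parents.insert page (pvAval (pvDictOf corpus) page) := by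
    funext parents page
    exact pv_innerA page (fun item => ((pvDictOf corpus).getD item []).contains page)
      (pvDictOf corpus).keys parents []
  rw [hcong]
  have h := PySem.Dict.items_foldl_insert_fresh (pvDictOf corpus).keys (fun p => p)
    (fun p => pvAval (pvDictOf corpus) p) PySem.Dict.empty
    (by intro a _; simp [PySem.Dict.empty, PySem.Dict.contains])
    (by simpa using pv_nodup_keys corpus)
  simpa [PySem.Dict.empty] using h

theorem pv_B_items (corpus : List (String × List String)) :
    getLinkParents_alt corpus
      = (pvDictOf corpus).keys.map (fun p =>
          (p, (pvDictOf corpus).items.foldl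
                (fun s sl =>
                  sl.2.foldl (fun s t => if p == t then PySem.Set.add s sl.1 else s) s)
                [])) := by
  unfold getLinkParents_alt
  have h0 : (pvDictOf corpus).keys.foldl
      (fun p page => p.insert page ([] : PySem.Set String)) PySem.Dict.empty
      = PySem.Dict.mk ((pvDictOf corpus).keys.map (fun p => (p, ([] : PySem.Set String)))) := by
    have h := PySem.Dict.items_foldl_insert_fresh (pvDictOf corpus).keys (fun p => p)
      (fun _ => ([] : PySem.Set String)) PySem.Dict.empty
      (by intro a _; simp [PySem.Dict.empty, PySem.Dict.contains])
      (by simpa using pv_nodup_keys corpus)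
    apply PySem.Dict.ext
    simpa [PySem.Dict.empty] using h
  rw [h0]
  have h1 := pv_B_outer (pvDictOf corpus).keys (pvDictOf corpus).items
    (fun _ => ([] : PySem.Set String))
  simp only at h1
  rw [h1]

theorem pv_vals_eq (corpus : List (String × List String)) (p : String) :
    pvAval (pvDictOf corpus) p
      = (pvDictOf corpus).items.foldl
          (fun s sl => sl.2.foldl (fun s t => if p == t then PySem.Set.add s sl.1 else s) s)
          [] := by
  unfold pvAval
  rw [PySem.Dict.keys, List.foldl_map]
  apply PySem.List.foldl_congr_mem
  intro acc sl hsl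
  rw [pv_getD_of_mem_items (pvDictOf corpus) (pv_nodup_keys corpus) sl hsl,
    pv_collapse p sl.1 sl.2 acc]

-- ===== VERDICT (by name: the statement is the Claim_ definition above) =====
theorem getLinkParents_spec : Claim_equal_getLinkParents := by
  intro corpus _
  unfold Spec_getLinkParents
  rw [pv_A_items, pv_B_items]
  apply List.map_congr_left
  intro p _
  rw [pv_vals_eq]
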